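-- pv_equiv track=rewrite | github.com/paiml/depyler | examples/hard_edge_string_parse.py | parse_unsigned
-- ===== SOURCE A (Python) =====
-- def parse_unsigned(s: str) -> int:
--     """Parse an unsigned integer from string."""
--     result: int = 0
--     i: int = 0
--     while i < len(s):
--         code: int = ord(s[i])
--         if code >= 48 and code <= 57:
--             result = result * 10 + (code - 48)
--         else:
--             return result
--         i = i + 1
--     return result
-- ===== SOURCE B (Python) =====
-- def parse_unsigned(s: str) -> int:
--     """Parse an unsigned integer from string."""
--     digits = []
--     for c in s:
--         if '0' <= c <= '9':
--             digits.append(c)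
--         else:
--             break
--     result = 0
--     place = 1
--     for c in reversed(digits):
--         result = result + (ord(c) - 48) * place
--         place = place * 10
--     return result
-- ===== Notes on version B (the rewrite author's own statement) =====
-- stated objective: alternative
-- what changed: B first collects the leading run of ASCII digits, then converts it back-to-front with an explicit place-value accumulator (units first, place *= 10), instead of A's single forward pass with the Horner accumulation result = result*10 + digit.
import Mathlib
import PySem

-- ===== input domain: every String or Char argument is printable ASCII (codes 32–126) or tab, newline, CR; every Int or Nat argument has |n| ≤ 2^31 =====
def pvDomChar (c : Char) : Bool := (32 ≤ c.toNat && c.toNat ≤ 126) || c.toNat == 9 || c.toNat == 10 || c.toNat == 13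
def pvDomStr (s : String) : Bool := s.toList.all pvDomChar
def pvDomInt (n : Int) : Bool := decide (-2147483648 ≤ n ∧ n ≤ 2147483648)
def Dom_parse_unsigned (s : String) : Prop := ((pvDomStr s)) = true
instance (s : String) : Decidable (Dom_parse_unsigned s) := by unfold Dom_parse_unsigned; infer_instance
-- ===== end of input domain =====

-- B changes the decomposition: collect the digit prefix, then convert it back-to-front
-- with a place-value accumulator instead of A's forward Horner accumulation (objective: alternative).

-- ===== PORT A =====
-- A's while loop over indices, as structural recursion over the remaining characters
-- with the accumulator `result`; `return result` on the first non-digit.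
def pvGoA : List Char → Int → Int
  | [], result => result
  | c :: rest, result =>
    let code : Int := c.toNat
    if 48 ≤ code ∧ code ≤ 57 then pvGoA rest (result * 10 + (code - 48))
    else result

def parse_unsigned (s : String) : Int := pvGoA s.toList 0

-- ===== PORT B =====
-- Source B's first loop: append digit chars, break at the first non-digit.
def pvTakeDigits : List Char → List Char
  | [] => []
  | c :: rest => if '0' ≤ c ∧ c ≤ '9' then c :: pvTakeDigits rest else []

-- Source B's second loop: over reversed digits, state (result, place).
def parse_unsigned_alt (s : String) : Int :=
  ((pvTakeDigits s.toList).reverse.foldl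
    (fun (st : Int × Int) c => (st.1 + ((c.toNat : Int) - 48) * st.2, st.2 * 10))
    (0, 1)).1

-- ===== PRECONDITION & SPEC =====
def Spec_parse_unsigned (s : String) (out : Int) : Prop := out = parse_unsigned_alt s
instance (s : String) (out : Int) : Decidable (Spec_parse_unsigned s out) := by unfold Spec_parse_unsigned; infer_instance

-- ===== CLAIM (what is proved, stated in full; the proofs are below) =====
def Claim_equal_parse_unsigned : Prop := ∀ (s : String), Dom_parse_unsigned s → Spec_parse_unsigned s (parse_unsigned s)

-- ===== LEMMAS AND PROOFS =====

-- value of a digit list, most significant first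
def pvVal : List Char → Int
  | [] => 0
  | c :: rest => ((c.toNat : Int) - 48) * 10 ^ rest.length + pvVal rest

theorem pvGoA_eq (cs : List Char) (r : Int) :
    pvGoA cs r = r * 10 ^ (pvTakeDigits cs).length + pvVal (pvTakeDigits cs) := by
  induction cs generalizing r with
  | nil => simp [pvGoA, pvTakeDigits, pvVal]
  | cons c rest ih =>
    have hcond : (48 ≤ (c.toNat : Int) ∧ (c.toNat : Int) ≤ 57) ↔ ('0' ≤ c ∧ c ≤ '9') := by
      rw [Char.le_def, Char.le_def, UInt32.le_iff_toNat_le, UInt32.le_iff_toNat_le]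
      have h0 : ('0':Char).val.toNat = 48 := rfl
      have h9 : ('9':Char).val.toNat = 57 := rfl
      have hc : c.val.toNat = c.toNat := rfl
      omega
    by_cases h : '0' ≤ c ∧ c ≤ '9'
    · simp only [pvGoA, pvTakeDigits, if_pos h, if_pos (hcond.mpr h), ih, pvVal,
        List.length_cons]
      ring
    · simp only [pvGoA, pvTakeDigits, if_neg h, if_neg (fun hh => h (hcond.mp hh)),
        List.length_nil, pvVal, pow_zero]
      ring

theorem pvFoldB_eq (d : List Char) (v p : Int) :
    d.reverse.foldl
      (fun (st : Int × Int) c => (st.1 + ((c.toNat : Int) - 48) * st.2, st.2 * 10))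
      (v, p) = (v + pvVal d * p, p * 10 ^ d.length) := by
  induction d generalizing v p with
  | nil => simp [pvVal]
  | cons c rest ih =>
    simp only [List.reverse_cons, List.foldl_append, ih, List.foldl_cons, List.foldl_nil,
      pvVal, List.length_cons, Prod.mk.injEq]
    constructor <;> ring

theorem parse_unsigned_spec' (s : String) : parse_unsigned s = parse_unsigned_alt s := by
  rw [parse_unsigned, parse_unsigned_alt, pvGoA_eq, pvFoldB_eq]
  ring

-- ===== VERDICT (by name: the statement is the Claim_ definition above) =====
theorem parse_unsigned_spec : Claim_equal_parse_unsigned := by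
  intro s _
  exact parse_unsigned_spec' s
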